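-- pv_equiv track=rewrite | github.com/manabu/nlp100-2015-python | chapter01/chapter01_03.py | execute
-- ===== SOURCE A (Python) =====
-- def execute(x):
--     templist = x.split(" ")
--     ret = []
--     for item in templist:
--         num = 0
--         for ch in item:
--             if ch.isalpha():
--                 num = num + 1
--         ret.append(num)
--     return ret
-- ===== SOURCE B (Python) =====
-- def execute(x):
--     ret = []
--     count = 0
--     for ch in x:
--         if ch == ' ':
--             ret.append(count)
--             count = 0
--         elif ch.isalpha():
--             count += 1
--     ret.append(count)
--     return ret
-- ===== Notes on version B (the rewrite author's own statement) =====
-- stated objective: alternative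
-- what changed: Replaces split-into-words plus a nested per-word counting loop with one flat pass over the string that emits the running alphabetic count at each space and once at the end.
import Mathlib
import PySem

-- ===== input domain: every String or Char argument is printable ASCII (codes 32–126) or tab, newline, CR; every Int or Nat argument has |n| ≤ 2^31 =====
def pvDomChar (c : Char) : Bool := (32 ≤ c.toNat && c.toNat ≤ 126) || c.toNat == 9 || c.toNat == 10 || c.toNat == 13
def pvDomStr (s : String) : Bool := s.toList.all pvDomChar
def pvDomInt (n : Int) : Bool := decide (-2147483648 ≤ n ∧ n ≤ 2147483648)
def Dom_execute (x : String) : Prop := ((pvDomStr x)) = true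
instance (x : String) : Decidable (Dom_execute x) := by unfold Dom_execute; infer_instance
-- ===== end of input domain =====

-- B does the same counting in one flat pass over the string instead of split + nested loops; return value only, no side effects.

-- ===== PORT A =====
-- templist = x.split(" "); for item: num = Σ isalpha; ret.append(num)
def execute (x : String) : List Int :=
  let templist := PySem.Chars.splitOn x.toList [' ']
  templist.foldl
    (fun ret item =>
      ret ++ [item.foldl (fun num ch => if PySem.Chars.isalpha ch then num + 1 else num) (0 : Int)])
    []

-- ===== PORT B =====
-- one pass: at ' ' flush the running count, else count alphabetic chars; flush once at the end
def executeAltGo : List Char → List Int → Int → List Int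
  | [], ret, count => ret ++ [count]
  | ch :: rest, ret, count =>
    if ch = ' ' then executeAltGo rest (ret ++ [count]) 0
    else if PySem.Chars.isalpha ch then executeAltGo rest ret (count + 1)
    else executeAltGo rest ret count

def execute_alt (x : String) : List Int := executeAltGo x.toList [] 0

-- ===== PRECONDITION & SPEC =====
def Spec_execute (x : String) (out : List Int) : Prop := out = execute_alt x
instance (x : String) (out : List Int) : Decidable (Spec_execute x out) := by unfold Spec_execute; infer_instance

-- ===== CLAIM (what is proved, stated in full; the proofs are below) =====
def Claim_equal_execute : Prop := ∀ (x : String), Dom_execute x → Spec_execute x (execute x)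

-- ===== LEMMAS AND PROOFS =====

/-- Fuel-free reference splitter on the single-character separator `' '`. -/
def splitAux : List Char → List Char → List (List Char)
  | [], cur => [cur.reverse]
  | c :: rest, cur =>
    if c = ' ' then cur.reverse :: splitAux rest [] else splitAux rest (c :: cur)

lemma splitOn_go_eq (fuel : Nat) (cs cur : List Char) (acc : List (List Char))
    (h : cs.length < fuel) :
    PySem.Chars.splitOn.go [' '] fuel cs cur acc = acc.reverse ++ splitAux cs cur := by
  induction fuel generalizing cs cur acc with
  | zero => omega
  | succ f ih =>
    cases cs with
    | nil => simp [PySem.Chars.splitOn.go, splitAux]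
    | cons c rest =>
      by_cases hc : c = ' '
      · subst hc
        rw [show PySem.Chars.splitOn.go [' '] (f+1) (' ' :: rest) cur acc
              = PySem.Chars.splitOn.go [' '] f rest [] (cur.reverse :: acc) by
            simp [PySem.Chars.splitOn.go, List.isPrefixOf]]
        rw [ih rest [] (cur.reverse :: acc) (by simpa using Nat.lt_of_succ_lt_succ h)]
        simp [splitAux]
      · rw [show PySem.Chars.splitOn.go [' '] (f+1) (c :: rest) cur acc
              = PySem.Chars.splitOn.go [' '] f rest (c :: cur) acc by
            simp only [PySem.Chars.splitOn.go, List.isPrefixOf, Bool.and_eq_true, beq_iff_eq]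
            rw [if_neg]; simp [Ne.symm hc]]
        rw [ih rest (c :: cur) acc (by simpa using Nat.lt_of_succ_lt_succ h)]
        simp [splitAux, hc]

lemma splitOn_eq (cs : List Char) :
    PySem.Chars.splitOn cs [' '] = splitAux cs [] := by
  unfold PySem.Chars.splitOn
  rw [splitOn_go_eq (cs.length + 1) cs [] [] (Nat.lt_succ_self _)]
  simp

lemma goB_eq (cs : List Char) (ret : List Int) (cur : List Char) (count : Int)
    (h : count = (cur.countP PySem.Chars.isalpha : Int)) :
    executeAltGo cs ret count
      = ret ++ (splitAux cs cur).map
          (fun item => (item.countP PySem.Chars.isalpha : Int)) := by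
  induction cs generalizing ret cur count with
  | nil =>
    simp [executeAltGo, splitAux, h, List.countP_reverse]
  | cons c rest ih =>
    by_cases hc : c = ' '
    · subst hc
      rw [show executeAltGo (' ' :: rest) ret count = executeAltGo rest (ret ++ [count]) 0 by
        simp [executeAltGo]]
      rw [ih (ret ++ [count]) [] 0 (by simp)]
      simp [splitAux, h, List.countP_reverse]
    · by_cases ha : PySem.Chars.isalpha c
      · rw [show executeAltGo (c :: rest) ret count = executeAltGo rest ret (count + 1) by
          simp [executeAltGo, hc, ha]]
        rw [ih ret (c :: cur) (count + 1) (by simp [ha, h])]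
        simp [splitAux, hc]
      · rw [show executeAltGo (c :: rest) ret count = executeAltGo rest ret count by
          simp [executeAltGo, hc, ha]]
        rw [ih ret (c :: cur) count (by simp [ha, h])]
        simp [splitAux, hc]

-- ===== VERDICT (by name: the statement is the Claim_ definition above) =====
theorem execute_spec : Claim_equal_execute := by
  intro x _
  unfold Spec_execute execute execute_alt
  rw [splitOn_eq, goB_eq x.toList [] [] 0 (by simp),
    PySem.List.foldl_append_singleton_eq_map]
  simp [PySem.List.foldl_count_if]
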